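-- pv_equiv track=rewrite | github.com/JossF/AdventOfCode | advent_of_code/2020/day_10.py | split_into_sub
-- ===== SOURCE A (Python) =====
-- def split_into_sub(l_in):
--     s_list = sorted(l_in)
--     split_list = []
--     temp_list = []
--     for i in range(1, len(l_in)):
--         temp_list.append(s_list[i - 1])
--         if s_list[i] - s_list[i - 1] == 3:
--             split_list.append(temp_list)
--             temp_list = []
--     return split_list
-- ===== SOURCE B (Python) =====
-- def split_into_sub(l_in):
--     s = sorted(l_in)
--     breaks = [i for i in range(1, len(s)) if s[i] - s[i - 1] == 3]
--     result = []
--     start = 0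
--     for b in breaks:
--         result.append(s[start:b])
--         start = b
--     return result
-- ===== Notes on version B (the rewrite author's own statement) =====
-- stated objective: alternative
-- what changed: Replaces the single accumulate-and-flush loop carrying a growing temp list by a two-phase decomposition: first compute the list of breakpoint indices where the sorted gap is 3, then emit the slice between consecutive breakpoints (never emitting a trailing slice, matching A exactly).
import Mathlib
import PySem

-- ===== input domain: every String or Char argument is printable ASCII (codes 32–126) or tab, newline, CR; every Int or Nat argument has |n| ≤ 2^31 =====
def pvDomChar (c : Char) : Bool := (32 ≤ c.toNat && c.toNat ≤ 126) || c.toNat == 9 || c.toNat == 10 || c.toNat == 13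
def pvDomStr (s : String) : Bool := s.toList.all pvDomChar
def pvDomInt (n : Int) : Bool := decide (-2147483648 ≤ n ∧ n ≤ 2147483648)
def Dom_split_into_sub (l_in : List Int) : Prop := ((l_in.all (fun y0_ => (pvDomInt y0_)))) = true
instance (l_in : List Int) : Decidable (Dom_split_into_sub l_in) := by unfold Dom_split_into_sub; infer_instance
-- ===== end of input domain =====

-- B differs from A by a two-phase decomposition (compute breakpoint indices, then slice); same result, same cost.

-- ===== PORT A =====
-- loop body of A's for-loop: append s[i-1] to temp, flush on a gap of 3
def aStep (s : List Int) (st : List (List Int) × List Int) (i : Int) : List (List Int) × List Int :=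
  let temp := st.2 ++ [PySem.List.pyGetD s (i - 1) 0]
  if PySem.List.pyGetD s i 0 - PySem.List.pyGetD s (i - 1) 0 = 3 then
    (st.1 ++ [temp], [])
  else
    (st.1, temp)

def split_into_sub (l_in : List Int) : List (List Int) :=
  let s := PySem.List.sorted l_in id false
  ((PySem.List.pyRange 1 l_in.length 1).foldl (aStep s) ([], [])).1

-- ===== PORT B =====
-- loop body of B's for-loop over breakpoints: emit the slice s[start:b], move start
def bStep (s : List Int) (st : List (List Int) × Int) (b : Int) : List (List Int) × Int :=
  (st.1 ++ [PySem.List.slice s (some st.2) (some b)], b)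

def split_into_sub_alt (l_in : List Int) : List (List Int) :=
  let s := PySem.List.sorted l_in id false
  let breaks := (PySem.List.pyRange 1 s.length 1).filter
    (fun i => decide (PySem.List.pyGetD s i 0 - PySem.List.pyGetD s (i - 1) 0 = 3))
  (breaks.foldl (bStep s) ([], 0)).1

-- ===== PRECONDITION & SPEC =====
def Spec_split_into_sub (l_in : List Int) (out : List (List Int)) : Prop := out = split_into_sub_alt l_in
instance (l_in : List Int) (out : List (List Int)) : Decidable (Spec_split_into_sub l_in out) := by unfold Spec_split_into_sub; infer_instance

-- ===== CLAIM (what is proved, stated in full; the proofs are below) =====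
def Claim_equal_split_into_sub : Prop := ∀ (l_in : List Int), Dom_split_into_sub l_in → Spec_split_into_sub l_in (split_into_sub l_in)

-- ===== LEMMAS AND PROOFS =====

-- appending s[j] to the slice s[start:j] yields the slice s[start:j+1]
lemma slice_snoc (s : List Int) (start j : Nat) (hsj : start ≤ j) (hj : j < s.length) :
    (s.drop start).take (j - start) ++ [s[j]] = (s.drop start).take (j + 1 - start) := by
  have h1 : j - start < (s.drop start).length := by simp [List.length_drop]; omega
  have h2 : (s.drop start)[j - start]'h1 = s[j] := by
    rw [List.getElem_drop]
    congr 1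
    omega
  rw [show j + 1 - start = (j - start) + 1 by omega, List.take_add_one]
  simp [List.getElem?_eq_getElem h1, h2]

-- main loop invariant: A's flush loop from index j+1 with pending run s[start:j]
-- equals B's slice-emitting fold over the remaining breakpoints
lemma loop_eq (s : List Int) (j start : Nat) (acc : List (List Int)) (hsj : start ≤ j) :
    (((PySem.List.pyRange ((j : Int) + 1) s.length 1).foldl (aStep s)
        (acc, (s.drop start).take (j - start)))).1
  = ((((PySem.List.pyRange ((j : Int) + 1) s.length 1).filter
        (fun i => decide (PySem.List.pyGetD s i 0 - PySem.List.pyGetD s (i - 1) 0 = 3))).foldl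
        (bStep s) (acc, (start : Int)))).1 := by
  by_cases hlt : j + 1 < s.length
  · -- unfold one step of the range
    have hcons : PySem.List.pyRange ((j : Int) + 1) s.length 1
        = ((j : Int) + 1) :: PySem.List.pyRange ((j : Int) + 1 + 1) s.length 1 :=
      PySem.List.pyRange_one_cons (by exact_mod_cast hlt)
    have hjlen : j < s.length := by omega
    have hget1 : PySem.List.pyGetD s ((j : Int) + 1 - 1) 0 = s[j] := by
      have : (j : Int) + 1 - 1 = ((j : Nat) : Int) := by ring
      rw [this, PySem.List.pyGetD_natCast, List.getD_eq_getElem?_getD,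
        List.getElem?_eq_getElem hjlen, Option.getD_some]
    have hsnoc : (s.drop start).take (j - start) ++ [s[j]] = (s.drop start).take (j + 1 - start) :=
      slice_snoc s start j hsj hjlen
    rw [hcons]
    simp only [List.foldl_cons, List.filter_cons]
    by_cases hc : PySem.List.pyGetD s ((j : Int) + 1) 0 - PySem.List.pyGetD s ((j : Int) + 1 - 1) 0 = 3
    · -- breakpoint at j+1: A flushes, B emits the slice s[start:j+1]
      have hc' : PySem.List.pyGetD s ((j : Int) + 1) 0 - s[j] = 3 := by
        rw [← hget1]; exact hc
      have hA : aStep s (acc, (s.drop start).take (j - start)) ((j : Int) + 1)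
          = (acc ++ [(s.drop start).take (j + 1 - start)], []) := by
        simp [aStep, List.getElem?_eq_getElem hjlen, hc', hsnoc]
      have hB : bStep s (acc, (start : Int)) ((j : Int) + 1)
          = (acc ++ [(s.drop start).take (j + 1 - start)], (j : Int) + 1) := by
        simp only [bStep]
        rw [show ((j : Int) + 1) = (((j + 1 : Nat) : Int)) by push_cast; ring,
          PySem.List.slice_natCast]
      rw [hA, if_pos (by simpa using hc), List.foldl_cons, hB]
      have hempty : (List.nil : List Int) = (s.drop (j + 1)).take ((j + 1) - (j + 1)) := by simp
      have := loop_eq s (j + 1) (j + 1) (acc ++ [(s.drop start).take (j + 1 - start)]) (le_refl _)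
      rw [show ((j : Int) + 1 + 1) = (((j + 1 : Nat) : Int) + 1) by push_cast; ring]
      rw [show ((j : Int) + 1) = (((j + 1 : Nat) : Int)) by push_cast; ring]
      simpa using this
    · -- no breakpoint: A extends temp, B skips the index
      have hc' : ¬ PySem.List.pyGetD s ((j : Int) + 1) 0 - s[j] = 3 := by
        rw [← hget1]; exact hc
      have hA : aStep s (acc, (s.drop start).take (j - start)) ((j : Int) + 1)
          = (acc, (s.drop start).take (j + 1 - start)) := by
        simp [aStep, List.getElem?_eq_getElem hjlen, hc', hsnoc]
      rw [hA, if_neg (by simpa using hc)]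
      have := loop_eq s (j + 1) start acc (by omega)
      rw [show ((j : Int) + 1 + 1) = (((j + 1 : Nat) : Int) + 1) by push_cast; ring]
      simpa using this
  · -- past the end: the remaining range is empty on both sides
    have hnil : PySem.List.pyRange ((j : Int) + 1) s.length 1 = [] :=
      PySem.List.pyRange_one_eq_nil (by omega)
    rw [hnil]
    simp
termination_by s.length - j

-- ===== VERDICT (by name: the statement is the Claim_ definition above) =====
theorem split_into_sub_spec : Claim_equal_split_into_sub := by
  intro l_in _
  unfold Spec_split_into_sub split_into_sub split_into_sub_alt
  simp only
  have hlen : (PySem.List.sorted l_in id false).length = l_in.length :=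
    PySem.List.length_sorted ..
  have := loop_eq (PySem.List.sorted l_in id false) 0 0 [] (le_refl _)
  simpa [hlen] using this
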